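-- pv_equiv track=rewrite | github.com/sumakola/sumacp | quiz.py | bestQuiz
-- ===== SOURCE A (Python) =====
-- def bestQuiz(l):
--     # Your  code goes ehre...
--     ca = 0  # currentaverage
--     ba = 0  # ba
--     n = 0
--     quiz = None
--     for i in range(len(l[0])):
--         currentsum = 0
--         n = 0
--         for j in range(len(l)):
--             if (l[j][i] != -1):
--                 n += 1
--                 currentsum += l[j][i]
--         if n > 0:
--             ca = currentsum//n
--             if ca > ba:
--                 ba = ca
--                 quiz = i
--     return quiz
-- ===== SOURCE B (Python) =====
-- def bestQuiz(l):
--     cands = []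
--     for c in range(len(l[0])):
--         vals = [row[c] for row in l if row[c] != -1]
--         if vals:
--             a = sum(vals) // len(vals)
--             if a > 0:
--                 cands.append((-a, c))
--     cands.sort()
--     return cands[0][1] if cands else None
-- ===== Notes on version B (the rewrite author's own statement) =====
-- stated objective: alternative
-- what changed: B builds a list of (negated integer average, column index) candidate pairs for columns with a positive average of non-(-1) entries, sorts it lexicographically and returns the index of the first pair, replacing A's running-best state machine with a sort-then-pick-first argmax.
import Mathlib
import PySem

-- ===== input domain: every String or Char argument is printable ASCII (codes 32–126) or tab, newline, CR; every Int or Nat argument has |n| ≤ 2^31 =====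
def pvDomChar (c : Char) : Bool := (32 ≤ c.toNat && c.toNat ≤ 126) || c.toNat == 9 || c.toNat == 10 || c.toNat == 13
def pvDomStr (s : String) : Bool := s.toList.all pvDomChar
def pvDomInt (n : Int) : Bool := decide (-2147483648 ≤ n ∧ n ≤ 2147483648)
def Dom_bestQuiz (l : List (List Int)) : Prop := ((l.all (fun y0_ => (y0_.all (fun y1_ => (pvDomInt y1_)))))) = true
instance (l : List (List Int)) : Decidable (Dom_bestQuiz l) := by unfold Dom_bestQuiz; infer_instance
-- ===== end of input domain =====

-- B replaces A's running-best state machine by building a (negated-average, column) candidate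
-- list, sorting it lexicographically and returning the first pair's index (objective: alternative).
-- ===== PORT A =====
-- A's inner j-loop over the rows for a fixed column i: state (n, currentsum)
def bestQuiz (l : List (List Int)) : Option Int :=
  let cols := (l.headD []).length
  ((List.range cols).foldl (fun (st : Int × Option Int) (i : Nat) =>
      let inner := l.foldl (fun (p : Int × Int) row =>
        if row.getD i 0 ≠ -1 then (p.1 + 1, p.2 + row.getD i 0) else p) (0, 0)
      if inner.1 > 0 then
        let ca := PySem.Int.floordiv inner.2 inner.1
        if ca > st.1 then (ca, some (i : Int)) else st
      else st) (0, none)).2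

-- ===== PORT B =====
def bestQuiz_alt (l : List (List Int)) : Option Int :=
  let cols := (l.headD []).length
  let cands := (List.range cols).foldl (fun (acc : List (Int × Int)) (c : Nat) =>
      let vals := (l.filter (fun row => row.getD c 0 ≠ -1)).map (fun row => row.getD c 0)
      if vals ≠ [] then
        let a := PySem.Int.floordiv vals.sum (vals.length : Int)
        if a > 0 then acc ++ [(-a, (c : Int))] else acc
      else acc) []
  match PySem.List.sorted2 cands Prod.fst Prod.snd with
  | [] => none
  | p :: _ => some p.2

-- ===== PRECONDITION & SPEC =====
-- A raises IndexError when the outer list is empty (its first access l[0]) and when some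
-- row is shorter than row 0 (the inner access l[j][i]); exactly those inputs are excluded.
def Pre_bestQuiz (l : List (List Int)) : Prop :=
  l ≠ [] ∧ ∀ r ∈ l, (l.headD []).length ≤ r.length
instance (l : List (List Int)) : Decidable (Pre_bestQuiz l) := by unfold Pre_bestQuiz; infer_instance
def pvWitness_bestQuiz : List (List Int) := [[3, -1], [1, 5]]
def Spec_bestQuiz (l : List (List Int)) (out : Option Int) : Prop := out = bestQuiz_alt l
instance (l : List (List Int)) (out : Option Int) : Decidable (Spec_bestQuiz l out) := by unfold Spec_bestQuiz; infer_instance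

-- ===== CLAIM (what is proved, stated in full; the proofs are below) =====
def Claim_equal_bestQuiz : Prop := ∀ (l : List (List Int)), Dom_bestQuiz l → Pre_bestQuiz l → Spec_bestQuiz l (bestQuiz l)

-- ===== LEMMAS AND PROOFS =====

-- the lexicographic comparator sorted2/insertBy uses for keys (Prod.fst, Prod.snd)
def pvLt (x m : Int × Int) : Bool :=
  decide (x.1 < m.1) || (!decide (m.1 < x.1) && decide (x.2 < m.2))

-- running "first minimum" update
def pvUpd (o : Option (Int × Int)) (x : Int × Int) : Option (Int × Int) :=
  match o with
  | none => some x
  | some m => if pvLt x m then some x else some m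

-- head of insertBy = the smaller of the new element and the old head
theorem head_insertBy (lt : Int × Int → Int × Int → Bool) (x : Int × Int) (a : List (Int × Int)) :
    (PySem.List.insertBy lt x a).head? =
      match a.head? with
      | none => some x
      | some m => if lt x m then some x else some m := by
  cases a with
  | nil => simp [PySem.List.insertBy]
  | cons m t => simp only [PySem.List.insertBy, List.head?_cons]; split <;> simp

-- head of the insertion-sort fold is the running first-minimum
theorem head_sort_fold (lt : Int × Int → Int × Int → Bool) (xs : List (Int × Int)) :
    ∀ (acc : List (Int × Int)),
    (xs.foldl (fun a x => PySem.List.insertBy lt x a) acc).head? =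
      xs.foldl (fun o x =>
        match o with
        | none => some x
        | some m => if lt x m then some x else some m) acc.head? := by
  induction xs with
  | nil => intro acc; rfl
  | cons x t ih =>
    intro acc
    simp only [List.foldl_cons]
    rw [ih, head_insertBy]

-- A's inner row fold, run from (a, b), adds the filtered count and sum
theorem inner_fold (c : Nat) (l : List (List Int)) : ∀ (a b : Int),
    l.foldl (fun (p : Int × Int) row =>
        if row.getD c 0 ≠ -1 then (p.1 + 1, p.2 + row.getD c 0) else p) (a, b)
      = (a + ((l.filter (fun row => row.getD c 0 ≠ -1)).length : Int),
         b + ((l.filter (fun row => row.getD c 0 ≠ -1)).map (fun row => row.getD c 0)).sum) := by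
  induction l with
  | nil => intro a b; simp
  | cons r t ih =>
    intro a b
    simp only [List.foldl_cons, List.filter_cons]
    by_cases h : r.getD c 0 ≠ -1
    · simp only [if_pos h, decide_eq_true (by exact h)]
      rw [ih]
      simp
      constructor <;> ring
    · simp only [if_neg h]
      rw [ih]
      simp only [decide_eq_true_eq]
      rw [if_neg h]

-- the column step on the running minimum corresponding to B's candidate-append step
def pvStepO (l : List (List Int)) (o : Option (Int × Int)) (c : Nat) : Option (Int × Int) :=
  let vals := (l.filter (fun row => row.getD c 0 ≠ -1)).map (fun row => row.getD c 0)
  if vals ≠ [] then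
    let a := PySem.Int.floordiv vals.sum (vals.length : Int)
    if a > 0 then pvUpd o (-a, (c : Int)) else o
  else o

-- the running minimum of the built candidate list = folding the update over the columns
theorem build_min (l : List (List Int)) (is : List Nat) : ∀ (acc : List (Int × Int)),
    ((is.foldl (fun (acc : List (Int × Int)) (c : Nat) =>
        let vals := (l.filter (fun row => row.getD c 0 ≠ -1)).map (fun row => row.getD c 0)
        if vals ≠ [] then
          let a := PySem.Int.floordiv vals.sum (vals.length : Int)
          if a > 0 then acc ++ [(-a, (c : Int))] else acc
        else acc) acc).foldl pvUpd none)
      = is.foldl (pvStepO l) (acc.foldl pvUpd none) := by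
  induction is with
  | nil => intro acc; rfl
  | cons c t ih =>
    intro acc
    simp only [List.foldl_cons]
    rw [ih]
    congr 1
    simp only [pvStepO]
    split
    · split
      · rw [List.foldl_append]; rfl
      · rfl
    · rfl

-- the invariant tying A's (ba, quiz) state to the running minimum
def pvRel (ba : Int) (quiz : Option Int) (o : Option (Int × Int)) : Prop :=
  o = quiz.map (fun q => (-ba, q)) ∧ (quiz = none → ba = 0) ∧ (∀ q, quiz = some q → 0 < ba)

-- main correspondence: A's column fold and the running-minimum fold stay related
theorem corr (l : List (List Int)) (is : List Nat) (hp : is.Pairwise (· < ·)) :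
    ∀ (ba : Int) (quiz : Option Int) (o : Option (Int × Int)),
    pvRel ba quiz o →
    (∀ i ∈ is, ∀ q : Int, quiz = some q → q < (i : Int)) →
    pvRel (is.foldl (fun (st : Int × Option Int) (i : Nat) =>
        let inner := l.foldl (fun (p : Int × Int) row =>
          if row.getD i 0 ≠ -1 then (p.1 + 1, p.2 + row.getD i 0) else p) (0, 0)
        if inner.1 > 0 then
          let ca := PySem.Int.floordiv inner.2 inner.1
          if ca > st.1 then (ca, some (i : Int)) else st
        else st) (ba, quiz)).1
      (is.foldl (fun (st : Int × Option Int) (i : Nat) =>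
        let inner := l.foldl (fun (p : Int × Int) row =>
          if row.getD i 0 ≠ -1 then (p.1 + 1, p.2 + row.getD i 0) else p) (0, 0)
        if inner.1 > 0 then
          let ca := PySem.Int.floordiv inner.2 inner.1
          if ca > st.1 then (ca, some (i : Int)) else st
        else st) (ba, quiz)).2
      (is.foldl (pvStepO l) o) := by
  induction is with
  | nil => intro ba quiz o hrel _; exact hrel
  | cons i t ih =>
    intro ba quiz o hrel hbound
    have hp' : t.Pairwise (· < ·) := hp.tail
    have hit : ∀ j ∈ t, i < j := fun j hj => List.rel_of_pairwise_cons hp hj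
    simp only [List.foldl_cons]
    -- rewrite A's inner loop
    rw [inner_fold i l 0 0]
    set n : Nat := (l.filter (fun row => row.getD i 0 ≠ -1)).length with hn
    set s : Int := ((l.filter (fun row => row.getD i 0 ≠ -1)).map (fun row => row.getD i 0)).sum with hs
    obtain ⟨ho, h0, hpos⟩ := hrel
    by_cases hn0 : n = 0
    · -- empty column: both sides skip
      have hA : ¬ ((0 : Int) + (n : Int) > 0) := by omega
      have hvals : ¬ ((l.filter (fun row => row.getD i 0 ≠ -1)).map (fun row => row.getD i 0)) ≠ [] := by
        simp only [ne_eq, not_not, ← List.length_eq_zero_iff, List.length_map]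
        omega
      simp only [hA, if_false, pvStepO, if_neg hvals]
      exact ih hp' ba quiz o ⟨ho, h0, hpos⟩ (fun j hj => hbound j (List.mem_cons_of_mem _ hj))
    · have hA : ((0 : Int) + (n : Int) > 0) := by omega
      have hlen : ((l.filter (fun row => row.getD i 0 ≠ -1)).map (fun row => row.getD i 0)).length = n := by
        simp [hn]
      have hvals : ((l.filter (fun row => row.getD i 0 ≠ -1)).map (fun row => row.getD i 0)) ≠ [] := by
        intro h; rw [h] at hlen; simp at hlen; omega
      set ca : Int := PySem.Int.floordiv ((0 : Int) + s) ((0 : Int) + (n : Int)) with hca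
      have hcaeq : PySem.Int.floordiv
          ((l.filter (fun row => row.getD i 0 ≠ -1)).map (fun row => row.getD i 0)).sum
          (((l.filter (fun row => row.getD i 0 ≠ -1)).map (fun row => row.getD i 0)).length : Int) = ca := by
        rw [hlen, hca, ← hs]; norm_num
      simp only [hA, if_true, pvStepO, if_pos hvals, hcaeq]
      by_cases hpos_ca : ca > 0
      · -- a candidate (-ca, i) is produced
        simp only [if_pos hpos_ca]
        cases quiz with
        | none =>
          have hba0 : ba = 0 := h0 rfl
          have hgt : ca > ba := by omega
          simp only [hgt, if_pos, ho, Option.map_none, pvUpd]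
          refine ih hp' ca (some (i : Int)) (some (-ca, (i : Int)))
            ⟨rfl, by simp, fun q hq => by omega⟩ ?_
          intro j hj q hq
          injection hq with hq; subst hq
          exact_mod_cast hit j hj
        | some q =>
          have hqi : q < (i : Int) := hbound i (List.mem_cons_self ..) q rfl
          have hbapos : 0 < ba := hpos q rfl
          rw [ho]
          simp only [Option.map_some, pvUpd, pvLt]
          have hsnd : ¬ ((i : Int) < q) := by omega
          by_cases hgt : ca > ba
          · have hlt : (decide (-ca < -ba) || (!decide (-ba < -ca) && decide ((i : Int) < q))) = true := by
              simp [hsnd]; omega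
            simp only [hgt, if_pos, hlt, if_pos]
            refine ih hp' ca (some (i : Int)) (some (-ca, (i : Int)))
              ⟨rfl, by simp, fun q' hq' => by omega⟩ ?_
            intro j hj q' hq'
            injection hq' with hq'; subst hq'
            exact_mod_cast hit j hj
          · have hlt : (decide (-ca < -ba) || (!decide (-ba < -ca) && decide ((i : Int) < q))) = false := by
              simp [hsnd]; omega
            rw [if_neg hgt]
            simp only [hlt, Bool.false_eq_true, if_false]
            refine ih hp' ba (some q) (some (-ba, q)) ⟨rfl, by simp, fun _ _ => hbapos⟩ ?_
            intro j hj q' hq'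
            injection hq' with hq'; subst hq'
            have : (i : Int) < j := by exact_mod_cast hit j hj
            omega
      · -- non-positive average: A cannot beat ba ≥ 0, B appends nothing
        have hba_nonneg : 0 ≤ ba := by
          cases quiz with
          | none => have := h0 rfl; omega
          | some q => exact le_of_lt (hpos q rfl)
        have hngt : ¬ (ca > ba) := by omega
        simp only [if_neg hpos_ca, if_neg hngt]
        exact ih hp' ba quiz o ⟨ho, h0, hpos⟩ (fun j hj => hbound j (List.mem_cons_of_mem _ hj))

-- match on sorted2 = head?.map snd
theorem match_head (s : List (Int × Int)) :
    (match s with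
      | [] => (none : Option Int)
      | p :: _ => some p.2) = s.head?.map Prod.snd := by
  cases s <;> rfl

-- ===== VERDICT (by name: the statement is the Claim_ definition above) =====
theorem bestQuiz_spec : Claim_equal_bestQuiz := by
  intro l _ _
  unfold Spec_bestQuiz bestQuiz bestQuiz_alt
  simp only []
  rw [match_head]
  rw [show ∀ cands : List (Int × Int), PySem.List.sorted2 cands Prod.fst Prod.snd
        = cands.foldl (fun a x => PySem.List.insertBy pvLt x a) [] from fun _ => rfl]
  rw [head_sort_fold]
  rw [show ∀ (cands : List (Int × Int)), cands.foldl (fun o x =>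
        match o with
        | none => some x
        | some m => if pvLt x m then some x else some m) ([] : List (Int × Int)).head?
      = cands.foldl pvUpd none from fun _ => rfl]
  rw [build_min l (List.range (l.headD []).length) []]
  obtain ⟨ho, -, -⟩ := corr l (List.range (l.headD []).length) (List.pairwise_lt_range)
    0 none none ⟨rfl, fun _ => rfl, by simp⟩ (by intro _ _ q hq; cases hq)
  rw [show ([] : List (Int × Int)).foldl pvUpd none = none from rfl] at *
  rw [ho]
  cases h : (((List.range (l.headD []).length)).foldl (fun (st : Int × Option Int) (i : Nat) =>
        let inner := l.foldl (fun (p : Int × Int) row =>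
          if row.getD i 0 ≠ -1 then (p.1 + 1, p.2 + row.getD i 0) else p) (0, 0)
        if inner.1 > 0 then
          let ca := PySem.Int.floordiv inner.2 inner.1
          if ca > st.1 then (ca, some (i : Int)) else st
        else st) (0, none)).2 <;> simp
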